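-- pv_equiv track=rewrite | github.com/sckimhub/lotto-ai | lotto_app.py | passes_omr_filter
-- ===== SOURCE A (Python) =====
-- from collections import Counter
--
-- OMR_COLS = 5
--
-- def passes_omr_filter(numbers: list) -> bool:
--     """실제 OMR 구조(5열 9행) 기준, 같은 행/열에 4개 이상 몰리는 패턴 차단."""
--     rows = [(n - 1) // OMR_COLS for n in numbers]
--     cols = [(n - 1) %  OMR_COLS for n in numbers]
--     if any(c >= 4 for c in Counter(rows).values()):
--         return False
--     if any(c >= 4 for c in Counter(cols).values()):
--         return False
--     return True
-- ===== SOURCE B (Python) =====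
-- def passes_omr_filter(numbers: list) -> bool:
--     """실제 OMR 구조(5열 9행) 기준, 같은 행/열에 4개 이상 몰리는 패턴 차단."""
--     rows = sorted((n - 1) // 5 for n in numbers)
--     cols = sorted((n - 1) % 5 for n in numbers)
--     return all(a != b for a, b in zip(rows, rows[3:])) and \
--            all(a != b for a, b in zip(cols, cols[3:]))
-- ===== Notes on version B (the rewrite author's own statement) =====
-- stated objective: alternative
-- what changed: Replaced A's hash-counting (two Counters whose values are scanned for >=4) with a sort-based algorithm: sort each projection and detect a value occurring 4+ times as a window ys[i] == ys[i+3] in the sorted list, so no frequency table is ever built.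
import Mathlib
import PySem

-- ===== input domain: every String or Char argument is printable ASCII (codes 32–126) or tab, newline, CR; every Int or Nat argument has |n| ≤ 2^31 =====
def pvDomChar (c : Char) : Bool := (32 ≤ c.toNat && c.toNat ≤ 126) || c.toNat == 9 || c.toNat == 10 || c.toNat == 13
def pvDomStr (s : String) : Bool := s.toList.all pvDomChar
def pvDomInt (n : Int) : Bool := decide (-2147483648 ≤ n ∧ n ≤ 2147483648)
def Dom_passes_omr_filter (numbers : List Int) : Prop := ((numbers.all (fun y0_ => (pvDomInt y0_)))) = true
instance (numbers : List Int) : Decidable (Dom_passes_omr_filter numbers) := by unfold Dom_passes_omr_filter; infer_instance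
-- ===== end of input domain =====

-- B replaces A's Counter-based frequency tables with a sort-based algorithm: a value occurs 4+ times
-- iff the sorted projection has ys[i] == ys[i+3] for some i (alternative algorithm, no hash counting).

-- ===== PORT A =====
def passes_omr_filter (numbers : List Int) : Bool :=
  let rows := numbers.map (fun n => PySem.Int.floordiv (n - 1) 5)
  let cols := numbers.map (fun n => PySem.Int.mod (n - 1) 5)
  if (PySem.Dict.counter rows).values.any (fun c => 4 ≤ c) then false
  else if (PySem.Dict.counter cols).values.any (fun c => 4 ≤ c) then false
  else true

-- ===== PORT B =====
-- all(a != b for a, b in zip(ys, ys[3:]))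
def pyNoRun4 (ys : List Int) : Bool :=
  (ys.zip (PySem.List.slice ys (some 3) none)).all (fun p => p.1 != p.2)

def passes_omr_filter_alt (numbers : List Int) : Bool :=
  let rows := PySem.List.sorted (numbers.map (fun n => PySem.Int.floordiv (n - 1) 5)) (fun x => x) false
  let cols := PySem.List.sorted (numbers.map (fun n => PySem.Int.mod (n - 1) 5)) (fun x => x) false
  pyNoRun4 rows && pyNoRun4 cols

-- ===== PRECONDITION & SPEC =====
def Spec_passes_omr_filter (numbers : List Int) (out : Bool) : Prop := out = passes_omr_filter_alt numbers
instance (numbers : List Int) (out : Bool) : Decidable (Spec_passes_omr_filter numbers out) := by unfold Spec_passes_omr_filter; infer_instance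

-- ===== CLAIM (what is proved, stated in full; the proofs are below) =====
def Claim_equal_passes_omr_filter : Prop := ∀ (numbers : List Int), Dom_passes_omr_filter numbers → Spec_passes_omr_filter numbers (passes_omr_filter numbers)

-- ===== LEMMAS AND PROOFS =====

-- monotone access into a Pairwise-(≤) list, ≤-indices version
lemma pairwise_le_getElem (ys : List Int) (hs : ys.Pairwise (· ≤ ·))
    (i j : Nat) (hij : i ≤ j) (hj : j < ys.length) : ys[i]'(by omega) ≤ ys[j] := by
  rcases Nat.lt_or_ge i j with h | h
  · exact List.pairwise_iff_getElem.mp hs i j (by omega) hj h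
  · have : i = j := by omega
    subst this; exact le_refl _

-- a sorted (Pairwise ≤) list has a window ys[i] = ys[i+3] iff some value occurs ≥ 4 times
lemma window_iff_count (ys : List Int) (hs : ys.Pairwise (· ≤ ·)) :
    (∃ i, ∃ h : i + 3 < ys.length, ys[i]'(by omega) = ys[i+3]) ↔ ∃ k : Int, 4 ≤ ys.count k := by
  constructor
  · rintro ⟨i, h, heq⟩
    refine ⟨ys[i]'(by omega), ?_⟩
    have h1 : ys[i]'(by omega) = ys[i+1]'(by omega) :=
      le_antisymm (pairwise_le_getElem ys hs i (i+1) (by omega) (by omega))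
        (heq ▸ pairwise_le_getElem ys hs (i+1) (i+3) (by omega) h)
    have h2 : ys[i]'(by omega) = ys[i+2]'(by omega) :=
      le_antisymm (pairwise_le_getElem ys hs i (i+2) (by omega) (by omega))
        (heq ▸ pairwise_le_getElem ys hs (i+2) (i+3) (by omega) h)
    have hd : List.drop i ys =
        ys[i]'(by omega) :: ys[i+1]'(by omega) :: ys[i+2]'(by omega) :: ys[i+3] :: List.drop (i+4) ys := by
      rw [List.drop_eq_getElem_cons (by omega), List.drop_eq_getElem_cons (by omega),
        List.drop_eq_getElem_cons (by omega), List.drop_eq_getElem_cons (by omega)]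
    have hle : (List.drop i ys).count (ys[i]'(by omega)) ≤ ys.count (ys[i]'(by omega)) :=
      (List.drop_sublist i ys).count_le _
    rw [hd] at hle
    rw [← h1, ← h2, ← heq] at hle
    simp [List.count_cons_self] at hle
    omega
  · rintro ⟨k, hk⟩
    have hrep : (List.replicate 4 k).Sublist ys := by
      have h1 : (List.replicate 4 k).Sublist (List.replicate (ys.count k) k) :=
        (List.replicate_sublist_replicate k).mpr hk
      have h2 : (List.replicate (ys.count k) k).Sublist ys := by
        rw [← List.filter_beq (l := ys) k]
        exact List.filter_sublist
      exact h1.trans h2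
    obtain ⟨is, hmap, hpw⟩ := List.sublist_eq_map_getElem hrep
    have hlen : is.length = 4 := by
      have := congrArg List.length hmap
      simpa using this.symm
    have hlt := List.pairwise_iff_getElem.mp hpw
    have h01 : is[0]'(by omega) < is[1]'(by omega) := hlt 0 1 (by omega) (by omega) (by omega)
    have h12 : is[1]'(by omega) < is[2]'(by omega) := hlt 1 2 (by omega) (by omega) (by omega)
    have h23 : is[2]'(by omega) < is[3]'(by omega) := hlt 2 3 (by omega) (by omega) (by omega)
    have hv0 : k = ys[(is[0]'(by omega) : Nat)]'(is[0]'(by omega)).isLt := by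
      have := congrArg (fun l => l[0]?) hmap
      simp [hlen] at this
      simpa using this
    have hv3 : k = ys[(is[3]'(by omega) : Nat)]'(is[3]'(by omega)).isLt := by
      have := congrArg (fun l => l[3]?) hmap
      simp [hlen] at this
      simpa using this
    set i : Nat := (is[0]'(by omega) : Nat) with hi
    set j : Nat := (is[3]'(by omega) : Nat) with hj
    have hij : i + 3 ≤ j := by
      have a1 : (is[0]'(by omega) : Fin ys.length) < is[1]'(by omega) := h01
      omega
    have hjlt : j < ys.length := (is[3]'(by omega)).isLt
    refine ⟨i, by omega, ?_⟩
    have lo : ys[i]'(by omega) ≤ ys[i+3]'(by omega) :=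
      pairwise_le_getElem ys hs i (i+3) (by omega) (by omega)
    have hi3j : ys[i+3]'(by omega) ≤ ys[j] :=
      pairwise_le_getElem ys hs (i+3) j hij hjlt
    rw [← hv0, ← hv3] at *
    omega

-- pyNoRun4 on a list is the all-windows-distinct test, stated with indices
lemma pyNoRun4_iff (ys : List Int) :
    pyNoRun4 ys = true ↔ ∀ i, ∀ h : i + 3 < ys.length, ys[i]'(by omega) ≠ ys[i+3] := by
  unfold pyNoRun4
  rw [PySem.List.slice_from ys (by norm_num : (0:Int) ≤ 3)]
  have h3 : (3 : Int).toNat = 3 := rfl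
  rw [h3, List.all_eq_true]
  constructor
  · intro hall i h
    have hmem : (ys[i]'(by omega), ys[i+3]) ∈ ys.zip (ys.drop 3) := by
      rw [List.mem_iff_getElem]
      refine ⟨i, by simp [List.length_zip]; omega, ?_⟩
      rw [List.getElem_zip]
      congr 1
      rw [List.getElem_drop]
      congr 1
      omega
    have := hall _ hmem
    simpa using this
  · intro h p hp
    rw [List.mem_iff_getElem] at hp
    obtain ⟨i, hi, hpi⟩ := hp
    simp only [List.length_zip, List.length_drop, lt_min_iff] at hi
    rw [List.getElem_zip] at hpi
    have hd : (ys.drop 3)[i]'(by simp only [List.length_drop]; omega) = ys[3+i]'(by omega) := List.getElem_drop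
    rw [hd] at hpi
    have := h i (by omega)
    subst hpi
    have h3i : 3 + i = i + 3 := by omega
    simp only [bne_iff_ne, ne_eq]
    simp [h3i] at this ⊢
    exact this

-- pyNoRun4 (sorted xs) succeeds iff no value occurs 4+ times in xs
lemma pyNoRun4_sorted_iff (xs : List Int) :
    pyNoRun4 (PySem.List.sorted xs (fun x => x) false) = true ↔ ∀ k : Int, xs.count k < 4 := by
  set ys := PySem.List.sorted xs (fun x => x) false with hys
  have hperm : ys.Perm xs := PySem.List.sorted_perm xs _ _
  have hpw : ys.Pairwise (· ≤ ·) := by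
    have := PySem.List.sorted_pairwise xs (fun x : Int => x) (κ := Int)
    simpa [hys] using this
  rw [pyNoRun4_iff]
  constructor
  · intro h k
    by_contra hk
    have : ∃ k : Int, 4 ≤ ys.count k := ⟨k, by rw [hperm.count_eq]; omega⟩
    obtain ⟨i, hi, heq⟩ := (window_iff_count ys hpw).mpr this
    exact h i hi heq
  · intro h i hi heq
    obtain ⟨k, hk⟩ := (window_iff_count ys hpw).mp ⟨i, hi, heq⟩
    rw [hperm.count_eq] at hk
    have := h k
    omega

-- a Counter's value scan 'any c >= 4' is 'some element occurs >= 4 times'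
lemma counter_values_any (xs : List Int) :
    (PySem.Dict.counter xs).values.any (fun c => 4 ≤ c) = true ↔ ∃ k, 4 ≤ (xs.count k : Int) := by
  rw [PySem.Dict.values_eq_map_keys _ (PySem.Dict.nodup_keys_counter xs) 0]
  simp only [List.any_map, List.any_eq_true, Function.comp]
  constructor
  · rintro ⟨k, -, hk⟩
    refine ⟨k, ?_⟩
    simp only [PySem.Dict.getD_counter, decide_eq_true_eq] at hk
    exact hk
  · rintro ⟨k, hk⟩
    refine ⟨k, ?_, ?_⟩
    · rw [PySem.Dict.keys_counter, PySem.Set.mem_ofList]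
      by_contra hmem
      rw [List.count_eq_zero_of_not_mem hmem] at hk
      norm_num at hk
    · simp only [PySem.Dict.getD_counter, decide_eq_true_eq]
      exact hk

-- ===== VERDICT (by name: the statement is the Claim_ definition above) =====
theorem passes_omr_filter_spec : Claim_equal_passes_omr_filter := by
  intro numbers _
  unfold Spec_passes_omr_filter passes_omr_filter passes_omr_filter_alt
  simp only []
  set rows := numbers.map (fun n => PySem.Int.floordiv (n - 1) 5) with hrows
  set cols := numbers.map (fun n => PySem.Int.mod (n - 1) 5) with hcols
  rw [Bool.eq_iff_iff]
  constructor
  · intro hA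
    split_ifs at hA with h1 h2
    rw [Bool.and_eq_true]
    constructor
    · rw [pyNoRun4_sorted_iff]
      intro k
      by_contra hk
      exact h1 ((counter_values_any rows).mpr ⟨k, by omega⟩)
    · rw [pyNoRun4_sorted_iff]
      intro k
      by_contra hk
      exact h2 ((counter_values_any cols).mpr ⟨k, by omega⟩)
  · intro hB
    rw [Bool.and_eq_true, pyNoRun4_sorted_iff, pyNoRun4_sorted_iff] at hB
    obtain ⟨hr, hc⟩ := hB
    have hc1 : ¬ ((PySem.Dict.counter rows).values.any (fun c => 4 ≤ c)) = true := by
      intro h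
      obtain ⟨k, hk⟩ := (counter_values_any rows).mp h
      have := hr k; omega
    have hc2 : ¬ ((PySem.Dict.counter cols).values.any (fun c => 4 ≤ c)) = true := by
      intro h
      obtain ⟨k, hk⟩ := (counter_values_any cols).mp h
      have := hc k; omega
    rw [if_neg hc1, if_neg hc2]
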